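-- pv_equiv track=rewrite | github.com/ericl12345/five-chess | checkHorizontalLine.py | check_horizontal_line
-- ===== SOURCE A (Python) =====
-- def check_horizontal_line(player_selection, board_line):
--     count = len(board_line)
--     for i in range(count - 4):
--         win = 0
--         for j in range(5):
--             if board_line[i + j] == player_selection:
--                 win = win + 1
--         if (win == 5):
--             return True
--
--     return False
-- ===== SOURCE B (Python) =====
-- def check_horizontal_line(player_selection, board_line):
--     consecutive = 0
--     for cell in board_line:
--         if cell == player_selection:
--             consecutive += 1
--             if consecutive == 5:
--                 return True
--         else:
--             consecutive = 0
--     return False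
-- ===== Notes on version B (the rewrite author's own statement) =====
-- stated objective: faster
-- what changed: Replaced the nested window scan (each start index re-counts its 5 cells) with a single pass keeping a running count of consecutive matches that resets on mismatch.
import Mathlib
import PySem

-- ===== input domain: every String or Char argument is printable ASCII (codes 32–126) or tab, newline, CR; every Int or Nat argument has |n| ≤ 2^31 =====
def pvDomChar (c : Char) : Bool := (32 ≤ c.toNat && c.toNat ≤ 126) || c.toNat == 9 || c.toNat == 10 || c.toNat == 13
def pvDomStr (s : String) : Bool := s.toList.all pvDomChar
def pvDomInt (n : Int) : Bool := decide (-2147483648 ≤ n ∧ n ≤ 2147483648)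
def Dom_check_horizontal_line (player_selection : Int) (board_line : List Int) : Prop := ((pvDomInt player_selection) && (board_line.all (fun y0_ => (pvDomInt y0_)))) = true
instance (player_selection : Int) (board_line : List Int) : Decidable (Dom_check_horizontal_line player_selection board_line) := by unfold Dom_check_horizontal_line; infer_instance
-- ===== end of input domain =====

-- B is a single pass with a running consecutive-match counter instead of A's nested window scan.

-- ===== PORT A =====
-- inner 'for j in range(5): if board_line[i+j] == player_selection: win += 1'
def pvAWin (player_selection : Int) (board_line : List Int) (i : Nat) : Nat :=
  (List.range 5).foldl
    (fun win j => if PySem.List.pyGet? board_line ((i + j : Nat) : Int) = some player_selection then win + 1 else win) 0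

-- outer 'for i in range(count - 4): … if win == 5: return True'; k = remaining iterations
def pvAGo (player_selection : Int) (board_line : List Int) : Nat → Nat → Bool
  | 0, _ => false
  | k + 1, i => if pvAWin player_selection board_line i = 5 then true else pvAGo player_selection board_line k (i + 1)

def check_horizontal_line (player_selection : Int) (board_line : List Int) : Bool :=
  pvAGo player_selection board_line (board_line.length - 4) 0

-- ===== PORT B =====
def pvBLoop (player_selection : Int) : List Int → Nat → Bool
  | [], _ => false
  | x :: rest, consecutive =>
    if x = player_selection then
      if consecutive + 1 = 5 then true else pvBLoop player_selection rest (consecutive + 1)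
    else pvBLoop player_selection rest 0

def check_horizontal_line_alt (player_selection : Int) (board_line : List Int) : Bool :=
  pvBLoop player_selection board_line 0

-- ===== PRECONDITION & SPEC =====
def Spec_check_horizontal_line (player_selection : Int) (board_line : List Int) (out : Bool) : Prop := out = check_horizontal_line_alt player_selection board_line
instance (player_selection : Int) (board_line : List Int) (out : Bool) : Decidable (Spec_check_horizontal_line player_selection board_line out) := by unfold Spec_check_horizontal_line; infer_instance

-- ===== CLAIM (what is proved, stated in full; the proofs are below) =====
def Claim_equal_check_horizontal_line : Prop := ∀ (player_selection : Int) (board_line : List Int), Dom_check_horizontal_line player_selection board_line → Spec_check_horizontal_line player_selection board_line (check_horizontal_line player_selection board_line)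

-- ===== LEMMAS AND PROOFS =====

-- "there is a run of k matches starting at index i"
def PvRun (p : Int) (xs : List Int) (i k : Nat) : Prop := ∀ j < k, xs[i + j]? = some p

-- "some window of 5 consecutive matches exists"
def PvWinEx (p : Int) (xs : List Int) : Prop := ∃ i, PvRun p xs i 5

theorem pvRun_mono {p : Int} {xs : List Int} {i k k' : Nat} (h : PvRun p xs i k) (hk : k' ≤ k) :
    PvRun p xs i k' := fun j hj => h j (lt_of_lt_of_le hj hk)

theorem pvRun_cons {p x : Int} {xs : List Int} {k : Nat} (hk : 0 < k) :
    PvRun p (x :: xs) 0 k ↔ x = p ∧ PvRun p xs 0 (k - 1) := by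
  constructor
  · intro h
    have h0 := h 0 hk
    simp at h0
    refine ⟨h0, fun j hj => ?_⟩
    have := h (j + 1) (by omega)
    simpa using this
  · rintro ⟨hx, h⟩ j hj
    cases j with
    | zero => simpa using hx
    | succ j => simpa using h j (by omega)

theorem pvRun_succ_iff {p x : Int} {xs : List Int} {i k : Nat} :
    PvRun p (x :: xs) (i + 1) k ↔ PvRun p xs i k := by
  constructor
  · intro h j hj
    have := h j hj
    simpa [Nat.add_right_comm] using this
  · intro h j hj
    have := h j hj
    simpa [Nat.add_right_comm] using this

theorem pvWinEx_cons {p x : Int} {xs : List Int} :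
    PvWinEx p (x :: xs) ↔ (x = p ∧ PvRun p xs 0 4) ∨ PvWinEx p xs := by
  constructor
  · rintro ⟨i, hi⟩
    cases i with
    | zero => exact Or.inl ((pvRun_cons (by omega)).1 hi)
    | succ i => exact Or.inr ⟨i, pvRun_succ_iff.1 hi⟩
  · rintro (⟨hx, h⟩ | ⟨i, hi⟩)
    · exact ⟨0, (pvRun_cons (by omega)).2 ⟨hx, h⟩⟩
    · exact ⟨i + 1, pvRun_succ_iff.2 hi⟩

-- A's inner count hits 5 iff the window starting at i is a run of 5
theorem pvAWin_eq_five {p : Int} {xs : List Int} {i : Nat} :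
    pvAWin p xs i = 5 ↔ PvRun p xs i 5 := by
  have e : ∀ j : Nat, PySem.List.pyGet? xs ((i + j : Nat) : Int) = xs[i + j]? := by
    intro j; simpa using PySem.List.pyGet?_natCast xs (i + j)
  show (List.range 5).foldl _ 0 = 5 ↔ _
  have hr : List.range 5 = [0, 1, 2, 3, 4] := by decide
  rw [hr]
  simp only [List.foldl, e]
  constructor
  · intro h j hj
    split_ifs at h with h0 h1 h2 h3 h4 <;> try omega
    interval_cases j <;> assumption
  · intro h
    have h0 : xs[i]? = some p := by simpa using h 0 (by omega)
    have h1 := h 1 (by omega); have h2 := h 2 (by omega)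
    have h3 := h 3 (by omega); have h4 := h 4 (by omega)
    simp [h0, h1, h2, h3, h4]

-- A's outer loop: true iff some window inside the scanned range is a run of 5
theorem pvAGo_iff {p : Int} {xs : List Int} :
    ∀ (k i : Nat), pvAGo p xs k i = true ↔ ∃ t < k, PvRun p xs (i + t) 5 := by
  intro k
  induction k with
  | zero => intro i; simp [pvAGo]
  | succ k ih =>
    intro i
    simp only [pvAGo]
    split_ifs with h
    · simp only [true_iff]
      exact ⟨0, by omega, by simpa using pvAWin_eq_five.1 h⟩
    · rw [ih]
      constructor
      · rintro ⟨t, ht, hr⟩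
        exact ⟨t + 1, by omega, by simpa [Nat.add_right_comm, Nat.add_assoc] using hr⟩
      · rintro ⟨t, ht, hr⟩
        cases t with
        | zero => exact absurd (pvAWin_eq_five.2 (by simpa using hr)) h
        | succ t => exact ⟨t, by omega, by simpa [Nat.add_right_comm, Nat.add_assoc] using hr⟩

theorem pvA_iff {p : Int} {xs : List Int} :
    check_horizontal_line p xs = true ↔ PvWinEx p xs := by
  rw [check_horizontal_line, pvAGo_iff]
  constructor
  · rintro ⟨t, _, hr⟩; exact ⟨t, by simpa using hr⟩
  · rintro ⟨t, hr⟩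
    have h4 := hr 4 (by omega)
    have hlt : t + 4 < xs.length := (List.getElem?_eq_some_iff.1 h4).1
    exact ⟨t, by omega, by simpa using hr⟩

-- B's loop invariant: with c pending matches, it answers true iff the list starts with a
-- run of (5 - c) matches or contains a full window of 5 somewhere
theorem pvBLoop_iff {p : Int} :
    ∀ (xs : List Int) (c : Nat), c ≤ 4 →
      (pvBLoop p xs c = true ↔ PvRun p xs 0 (5 - c) ∨ PvWinEx p xs) := by
  intro xs
  induction xs with
  | nil =>
    intro c hc
    simp only [pvBLoop, Bool.false_eq_true, false_iff]
    rintro (h | ⟨i, hi⟩)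
    · have := h 0 (by omega); simp at this
    · have := hi 0 (by omega); simp at this
  | cons x xs ih =>
    intro c hc
    simp only [pvBLoop]
    split_ifs with hx hc5
    · simp only [true_iff]
      refine Or.inl ((pvRun_cons (by omega)).2 ⟨hx, ?_⟩)
      have h0 : 5 - c - 1 = 0 := by omega
      rw [h0]
      intro j hj
      omega
    · rw [ih (c + 1) (by omega), pvWinEx_cons, pvRun_cons (by omega)]
      have h1 : 5 - c - 1 = 5 - (c + 1) := by omega
      constructor
      · rintro (h | h)
        · exact Or.inl ⟨hx, by rwa [h1]⟩
        · exact Or.inr (Or.inr h)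
      · rintro (⟨-, h⟩ | ⟨-, h⟩ | h)
        · exact Or.inl (by rwa [← h1])
        · exact Or.inl (by rw [← h1]; exact pvRun_mono h (by omega))
        · exact Or.inr h
    · rw [ih 0 (by omega), pvWinEx_cons]
      constructor
      · rintro (h | h)
        · exact Or.inr (Or.inr ⟨0, by simpa using h⟩)
        · exact Or.inr (Or.inr h)
      · rintro (h | ⟨hxp, -⟩ | h)
        · exact absurd (((pvRun_cons (by omega)).1 h).1) hx
        · exact absurd hxp hx
        · exact Or.inr h

theorem pvB_iff {p : Int} {xs : List Int} :
    check_horizontal_line_alt p xs = true ↔ PvWinEx p xs := by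
  rw [check_horizontal_line_alt, pvBLoop_iff xs 0 (by omega)]
  constructor
  · rintro (h | h)
    · exact ⟨0, by simpa using h⟩
    · exact h
  · exact Or.inr

-- ===== VERDICT (by name: the statement is the Claim_ definition above) =====
theorem check_horizontal_line_spec : Claim_equal_check_horizontal_line := by
  intro p xs _
  show check_horizontal_line p xs = check_horizontal_line_alt p xs
  rw [Bool.eq_iff_iff, pvA_iff, pvB_iff]
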